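-- pv_equiv track=rewrite | github.com/ross-alexander/src | tsm/split.py | split_kv_list
-- ===== SOURCE A (Python) =====
-- def split_kv_list(kv_list):
--     res = []
--     kv_map = {}
--     for item in kv_list:
--         if (len(item)):
--             items = [x.strip() for x in item.split(":", 1)]
--             kv_map[items[0]] = items[1]
--         else:
--             if (len(kv_map.keys())):
--                 res.append(kv_map)
--                 kv_map = {}
--     return res
-- ===== SOURCE B (Python) =====
-- def split_kv_list(kv_list):
--     # Pass 1: collect blank-line-terminated runs of non-empty lines
--     # (a trailing run with no terminating blank line is not a record).
--     groups = []
--     current = []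
--     for line in kv_list:
--         if line:
--             current.append(line)
--         else:
--             if current:
--                 groups.append(current)
--             current = []
--     # Pass 2: turn each run of "key: value" lines into a dict.
--     res = []
--     for group in groups:
--         d = {}
--         for line in group:
--             items = [x.strip() for x in line.split(":", 1)]
--             d[items[0]] = items[1]
--         res.append(d)
--     return res
-- ===== Notes on version B (the rewrite author's own statement) =====
-- stated objective: alternative
-- what changed: B separates the work into two passes - first group consecutive non-empty lines between blank separators, then build one dict per group - instead of A's single loop that interleaves dict building with flushing.
import Mathlib
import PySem

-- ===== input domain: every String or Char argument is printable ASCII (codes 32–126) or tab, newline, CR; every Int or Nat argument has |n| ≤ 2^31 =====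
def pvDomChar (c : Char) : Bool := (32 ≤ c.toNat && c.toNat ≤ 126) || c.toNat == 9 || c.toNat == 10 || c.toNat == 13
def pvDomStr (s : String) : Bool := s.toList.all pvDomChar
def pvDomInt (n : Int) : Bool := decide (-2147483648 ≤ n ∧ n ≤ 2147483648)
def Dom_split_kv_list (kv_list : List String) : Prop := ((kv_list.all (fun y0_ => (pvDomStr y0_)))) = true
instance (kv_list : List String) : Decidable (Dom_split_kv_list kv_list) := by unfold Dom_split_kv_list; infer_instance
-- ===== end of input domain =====

-- B re-decomposes A's single interleaved loop into two passes (group lines, then build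
-- one dict per group); return values agree on Pre_ (every non-empty line contains ':').

-- ===== PORT A =====
-- items = [x.strip() for x in item.split(":", 1)]; shared by both ports (B's Source B has the
-- same line textually inside its second pass).  items[1] would raise IndexError when the
-- line has no ':' — that input is excluded by Pre_ below; the .getD "" is never reached there.
def pvParse (item : String) : String × String :=
  let items := ((PySem.Str.splitMax? item ":" 1).getD []).map PySem.Str.strip
  (items.headD "", (PySem.List.pyGet? items 1).getD "")

def split_kv_list (kv_list : List String) : List (List (String × String)) :=
  (kv_list.foldl
    (fun (st : List (List (String × String)) × PySem.Dict String String) item =>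
      if PySem.Str.len item ≠ 0 then
        let kv := pvParse item
        (st.1, st.2.insert kv.1 kv.2)
      else if st.2.keys.length ≠ 0 then (st.1 ++ [st.2.items], PySem.Dict.empty)
      else st)
    ([], PySem.Dict.empty)).1

-- ===== PORT B =====
-- pass 1: blank-line-terminated runs of non-empty lines
def pvGroups (kv_list : List String) : List (List String) :=
  (kv_list.foldl
    (fun (st : List (List String) × List String) line =>
      if line ≠ "" then (st.1, st.2 ++ [line])
      else if st.2 ≠ [] then (st.1 ++ [st.2], [])
      else (st.1, []))
    ([], [])).1

-- pass 2: one dict per run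
def pvBuild (group : List String) : PySem.Dict String String :=
  group.foldl (fun d line => let kv := pvParse line; d.insert kv.1 kv.2) PySem.Dict.empty

def split_kv_list_alt (kv_list : List String) : List (List (String × String)) :=
  (pvGroups kv_list).map (fun g => (pvBuild g).items)

-- ===== PRECONDITION & SPEC =====
-- Pre_ excludes exactly the inputs on which the Python A raises IndexError:
-- a non-empty line with no ':' (items has one element, items[1] fails).
def Pre_split_kv_list (kv_list : List String) : Prop :=
  ∀ s ∈ kv_list, s ≠ "" → PySem.Str.isIn ":" s = true
instance (kv_list : List String) : Decidable (Pre_split_kv_list kv_list) := by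
  unfold Pre_split_kv_list; infer_instance

def pvWitness_split_kv_list : List String := ["a: 1", "b:2", "", "c : 3", ""]

def Spec_split_kv_list (kv_list : List String) (out : List (List (String × String))) : Prop := out = split_kv_list_alt kv_list
instance (kv_list : List String) (out : List (List (String × String))) : Decidable (Spec_split_kv_list kv_list out) := by unfold Spec_split_kv_list; infer_instance

-- ===== CLAIM (what is proved, stated in full; the proofs are below) =====
def Claim_equal_split_kv_list : Prop := ∀ (kv_list : List String), Dom_split_kv_list kv_list → Pre_split_kv_list kv_list → Spec_split_kv_list kv_list (split_kv_list kv_list)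

-- ===== LEMMAS AND PROOFS =====

-- inserting never empties a dict
lemma pv_items_insert_ne_nil (d : PySem.Dict String String) (k v : String) :
    (d.insert k v).items ≠ [] := by
  rw [PySem.Dict.items_insert]
  split_ifs with h
  · intro hcontra
    have hd : d.items = [] := List.map_eq_nil_iff.mp hcontra
    have hk : k ∈ d.keys := (PySem.Dict.contains_iff_mem_keys d k).mp h
    simp [PySem.Dict.keys, hd] at hk
  · simp

lemma pv_items_foldl_ne_nil (l : List String) (d : PySem.Dict String String)
    (h : d.items ≠ []) :
    (l.foldl (fun d line => let kv := pvParse line; d.insert kv.1 kv.2) d).items ≠ [] := by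
  induction l generalizing d with
  | nil => exact h
  | cons x xs ih => exact ih _ (pv_items_insert_ne_nil _ _ _)

-- a non-empty run builds a dict with at least one key
lemma pvBuild_items_ne_nil (g : List String) (h : g ≠ []) : (pvBuild g).items ≠ [] := by
  cases g with
  | nil => exact absurd rfl h
  | cons x xs =>
    unfold pvBuild
    simp only [List.foldl_cons]
    exact pv_items_foldl_ne_nil xs _ (pv_items_insert_ne_nil _ _ _)

-- accumulator of pass 1 factors out
lemma pvGroups_acc (l : List String) (gs : List (List String)) (cur : List String) :
    (l.foldl
      (fun (st : List (List String) × List String) line =>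
        if line ≠ "" then (st.1, st.2 ++ [line])
        else if st.2 ≠ [] then (st.1 ++ [st.2], [])
        else (st.1, []))
      (gs, cur)).1
    = gs ++ (l.foldl
      (fun (st : List (List String) × List String) line =>
        if line ≠ "" then (st.1, st.2 ++ [line])
        else if st.2 ≠ [] then (st.1 ++ [st.2], [])
        else (st.1, []))
      ([], cur)).1 := by
  induction l generalizing gs cur with
  | nil => simp
  | cons x xs ih =>
    simp only [List.foldl_cons]
    by_cases hx : x ≠ ""
    · simp only [if_pos hx]; exact ih gs (cur ++ [x])
    · simp only [if_neg hx]
      by_cases hc : cur ≠ []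
      · simp only [if_pos hc]
        rw [ih (gs ++ [cur]) [], ih ([] ++ [cur]) []]
        simp
      · simp only [if_neg hc]; exact ih gs []

-- main invariant: A's loop, run from (res, pvBuild cur), lands on B's grouped answer
lemma pv_main (l : List String) (cur : List String)
    (res : List (List (String × String))) :
    (l.foldl
      (fun (st : List (List (String × String)) × PySem.Dict String String) item =>
        if PySem.Str.len item ≠ 0 then
          let kv := pvParse item
          (st.1, st.2.insert kv.1 kv.2)
        else if st.2.keys.length ≠ 0 then (st.1 ++ [st.2.items], PySem.Dict.empty)
        else st)
      (res, pvBuild cur)).1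
    = res ++ ((l.foldl
      (fun (st : List (List String) × List String) line =>
        if line ≠ "" then (st.1, st.2 ++ [line])
        else if st.2 ≠ [] then (st.1 ++ [st.2], [])
        else (st.1, []))
      ([], cur)).1).map (fun g => (pvBuild g).items) := by
  induction l generalizing cur res with
  | nil => simp
  | cons x xs ih =>
    simp only [List.foldl_cons]
    by_cases hx : x ≠ ""
    · have hlen : PySem.Str.len x ≠ 0 := by
        simp only [PySem.Str.len_eq, ne_eq, Nat.cast_eq_zero, List.length_eq_zero_iff,
          String.toList_eq_nil_iff]
        exact hx
      simp only [if_pos hx, if_pos hlen]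
      have hb : (pvBuild cur).insert (pvParse x).1 (pvParse x).2 = pvBuild (cur ++ [x]) := by
        simp [pvBuild]
      rw [hb]
      exact ih (cur ++ [x]) res
    · have hlen : ¬ PySem.Str.len x ≠ 0 := by
        simp only [PySem.Str.len_eq, ne_eq, not_not, Nat.cast_eq_zero, List.length_eq_zero_iff,
          String.toList_eq_nil_iff]
        exact not_not.mp hx
      simp only [if_neg hx, if_neg hlen]
      by_cases hc : cur ≠ []
      · have hk : (pvBuild cur).keys.length ≠ 0 := by
          have := pvBuild_items_ne_nil cur hc
          simp only [PySem.Dict.keys, List.length_map]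
          simpa [List.length_eq_zero_iff] using this
        simp only [if_pos hc, if_pos hk]
        rw [pvGroups_acc, List.map_append]
        have := ih [] (res ++ [(pvBuild cur).items])
        simpa [pvBuild] using this
      · have hcur : cur = [] := not_not.mp hc
        subst hcur
        have hk : ¬ (pvBuild []).keys.length ≠ 0 := by simp [pvBuild]
        simp only [if_neg hc, if_neg hk]
        exact ih [] res

-- ===== VERDICT (by name: the statement is the Claim_ definition above) =====
theorem split_kv_list_spec : Claim_equal_split_kv_list := by
  intro kv _ _
  unfold Spec_split_kv_list split_kv_list split_kv_list_alt pvGroups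
  have := pv_main kv [] []
  simpa [pvBuild] using this
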